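-- pv_equiv track=rewrite | github.com/2025-2-fundamentos/PRE-02-programacion-en-python-mapreduce-Miguelvillarraga | homework/word_count.py | wordcount_reducer
-- ===== SOURCE A (Python) =====
-- def wordcount_reducer(pairs_sequence):
--     """Agrupa y suma los valores por clave (palabra)."""
--     result = []
--     for key, value in pairs_sequence:
--         if result and result[-1][0] == key:
--             result[-1] = (key, result[-1][1] + value)
--         else:
--             result.append((key, value))
--     return result
-- ===== SOURCE B (Python) =====
-- def wordcount_reducer(pairs_sequence):
--     """Agrupa y suma los valores por clave (palabra) — group-at-once scan."""
--     pairs = list(pairs_sequence)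
--     result = []
--     while pairs:
--         key, total = pairs[0]
--         j = 1
--         while j < len(pairs) and pairs[j][0] == key:
--             total += pairs[j][1]
--             j += 1
--         result.append((key, total))
--         pairs = pairs[j:]
--     return result
-- ===== Notes on version B (the rewrite author's own statement) =====
-- stated objective: alternative
-- what changed: B consumes each run of consecutive equal keys in one inner scan (seed = first value, add the rest) and emits its total once, instead of A's one-pass fold that repeatedly rewrites the last element of the growing result list.
import Mathlib
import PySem

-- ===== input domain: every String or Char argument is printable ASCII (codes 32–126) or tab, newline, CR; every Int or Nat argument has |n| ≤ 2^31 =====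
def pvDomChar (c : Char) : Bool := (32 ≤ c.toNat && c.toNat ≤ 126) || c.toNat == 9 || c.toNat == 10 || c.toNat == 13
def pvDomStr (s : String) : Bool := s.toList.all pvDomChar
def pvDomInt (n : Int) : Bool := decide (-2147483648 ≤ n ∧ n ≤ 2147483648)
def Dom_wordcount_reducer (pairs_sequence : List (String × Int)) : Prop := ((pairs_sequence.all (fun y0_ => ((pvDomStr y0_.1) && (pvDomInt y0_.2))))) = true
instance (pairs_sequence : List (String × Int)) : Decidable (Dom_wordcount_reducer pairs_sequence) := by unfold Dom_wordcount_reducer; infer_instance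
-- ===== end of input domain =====

-- B replaces A's fold that rewrites the last element of the growing result by a scan that
-- consumes each run of consecutive equal keys at once (alternative decomposition, same cost).

-- ===== PORT A =====
-- one loop step: `if result and result[-1][0] == key: result[-1] = (key, result[-1][1] + value) else: result.append((key, value))`
def wcStep (res : List (String × Int)) (p : String × Int) : List (String × Int) :=
  match res.getLast? with
  | some last => if last.1 == p.1 then res.dropLast ++ [(p.1, last.2 + p.2)] else res ++ [p]
  | none => res ++ [p]

def wordcount_reducer (pairs_sequence : List (String × Int)) : List (String × Int) :=
  pairs_sequence.foldl wcStep []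

-- ===== PORT B =====
-- Source B: take the leading run of pairs with the same key as the head, sum its values seeded
-- with the head's value, emit one pair, recurse on the remainder (`pairs = pairs[j:]`).
def wordcount_reducer_alt : List (String × Int) → List (String × Int)
  | [] => []
  | (k, v) :: rest =>
      let grp := rest.takeWhile (fun p => p.1 == k)
      (k, grp.foldl (fun t p => t + p.2) v) ::
        wordcount_reducer_alt (rest.dropWhile (fun p => p.1 == k))
termination_by xs => xs.length
decreasing_by
  simp only [List.length_cons]
  exact Nat.lt_succ_of_le (List.length_dropWhile_le _ _)

-- ===== PRECONDITION & SPEC =====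
def Spec_wordcount_reducer (pairs_sequence : List (String × Int)) (out : List (String × Int)) : Prop := out = wordcount_reducer_alt pairs_sequence
instance (pairs_sequence : List (String × Int)) (out : List (String × Int)) : Decidable (Spec_wordcount_reducer pairs_sequence out) := by unfold Spec_wordcount_reducer; infer_instance

-- ===== CLAIM (what is proved, stated in full; the proofs are below) =====
def Claim_equal_wordcount_reducer : Prop := ∀ (pairs_sequence : List (String × Int)), Dom_wordcount_reducer pairs_sequence → Spec_wordcount_reducer pairs_sequence (wordcount_reducer pairs_sequence)

-- ===== LEMMAS AND PROOFS =====

-- A's loop never touches anything before the last element: a nonempty seed splits off.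
lemma wc_fold_append : ∀ (xs : List (String × Int)) (acc r : List (String × Int)), r ≠ [] →
    List.foldl wcStep (acc ++ r) xs = acc ++ List.foldl wcStep r xs := by
  intro xs
  induction xs with
  | nil => intro acc r _; simp
  | cons p xs ih =>
      intro acc r hr
      simp only [List.foldl_cons]
      have hlast : (acc ++ r).getLast? = r.getLast? := List.getLast?_append_of_ne_nil acc hr
      obtain ⟨q, hq⟩ : ∃ q, r.getLast? = some q := ⟨r.getLast hr, List.getLast?_eq_some_getLast hr⟩
      have hdrop : (acc ++ r).dropLast = acc ++ r.dropLast := List.dropLast_append_of_ne_nil hr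
      by_cases hk : q.1 == p.1
      · have : wcStep (acc ++ r) p = acc ++ (r.dropLast ++ [(p.1, q.2 + p.2)]) := by
          simp [wcStep, hlast, hq, hk, hdrop]
        rw [this]
        have : wcStep r p = r.dropLast ++ [(p.1, q.2 + p.2)] := by simp [wcStep, hq, hk]
        rw [this]
        exact ih acc _ (by simp)
      · have : wcStep (acc ++ r) p = acc ++ (r ++ [p]) := by
          simp [wcStep, hlast, hq, hk]
        rw [this]
        have : wcStep r p = r ++ [p] := by simp [wcStep, hq, hk]
        rw [this]
        exact ih acc _ (by simp)

-- characterisation of A's loop from a singleton seed, by strong induction on length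
lemma wc_loop : ∀ (n : Nat) (xs : List (String × Int)), xs.length ≤ n → ∀ (k : String) (s : Int),
    List.foldl wcStep [(k, s)] xs =
      (k, (xs.takeWhile (fun p => p.1 == k)).foldl (fun t p => t + p.2) s) ::
        wordcount_reducer_alt (xs.dropWhile (fun p => p.1 == k)) := by
  intro n
  induction n with
  | zero =>
      intro xs hxs k s
      have : xs = [] := List.length_eq_zero_iff.mp (Nat.le_zero.mp hxs)
      subst this
      simp [wordcount_reducer_alt]
  | succ n ih =>
      intro xs hxs k s
      cases xs with
      | nil => simp [wordcount_reducer_alt]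
      | cons p xs =>
          obtain ⟨k', v⟩ := p
          simp only [List.foldl_cons]
          by_cases hk : k == k'
          · have hkeq : k = k' := by simpa using hk
            subst hkeq
            have hstep : wcStep [(k, s)] (k, v) = [(k, s + v)] := by
              simp [wcStep]
            rw [hstep]
            have hlen : xs.length ≤ n := by simpa using Nat.lt_succ_iff.mp (by simpa using hxs)
            rw [ih xs hlen k (s + v)]
            simp [List.takeWhile, List.dropWhile]
          · have hk' : ((k' : String) == k) = false := by
              cases h : (k' == k)
              · rfl
              · exact absurd (by simpa using (beq_iff_eq.mp h).symm ▸ (beq_self_eq_true k)) (by simp_all)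
            have hstep : wcStep [(k, s)] (k', v) = [(k, s), (k', v)] := by
              simp [wcStep, hk]
            rw [hstep]
            have : ([(k, s), (k', v)] : List (String × Int)) = [(k, s)] ++ [(k', v)] := rfl
            rw [this, wc_fold_append xs [(k, s)] [(k', v)] (by simp)]
            have hlen : xs.length ≤ n := by simpa using Nat.lt_succ_iff.mp (by simpa using hxs)
            rw [ih xs hlen k' v]
            simp [List.takeWhile, List.dropWhile, hk', wordcount_reducer_alt]

-- ===== VERDICT (by name: the statement is the Claim_ definition above) =====
theorem wordcount_reducer_spec : Claim_equal_wordcount_reducer := by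
  intro xs _
  unfold Spec_wordcount_reducer wordcount_reducer
  cases xs with
  | nil => simp [wordcount_reducer_alt]
  | cons p xs =>
      obtain ⟨k, v⟩ := p
      simp only [List.foldl_cons]
      have hstep : wcStep [] (k, v) = [(k, v)] := by simp [wcStep]
      rw [hstep, wc_loop xs.length xs le_rfl k v]
      simp [wordcount_reducer_alt]
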